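-- pv_equiv track=rewrite | github.com/JerrettDavis/AInbox | scripts/release_prepare.py | calculate_next_version
-- ===== SOURCE A (Python) =====
-- def calculate_next_version(current_version: str, release_type: str | None, last_tag: str | None) -> str | None:
--     if release_type is None:
--         return None
--     if last_tag is None:
--         return current_version
--
--     major, minor, patch = (int(part) for part in current_version.split("."))
--     if release_type == "major":
--         return f"{major + 1}.0.0"
--     if release_type == "minor":
--         return f"{major}.{minor + 1}.0"
--     return f"{major}.{minor}.{patch + 1}"
-- ===== SOURCE B (Python) =====
-- def calculate_next_version(current_version: str, release_type: str | None, last_tag: str | None) -> str | None: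
--     if release_type is None:
--         return None
--     if last_tag is None:
--         return current_version
--
--     major, minor, patch = (int(part) for part in current_version.split("."))
--
--     def go(vals, names):
--         # sequential search down the component list: bump at the first name
--         # matching release_type (or at the last component as the default),
--         # then zero everything after it
--         if names[0] == release_type or len(vals) == 1:
--             return [vals[0] + 1] + [0] * (len(vals) - 1)
--         return [vals[0]] + go(vals[1:], names[1:])
--
--     return ".".join(str(v) for v in go([major, minor, patch], ["major", "minor", "patch"]))
-- ===== Notes on version B (the rewrite author's own statement) =====
-- stated objective: alternative
-- what changed: Replaces A's three format-string branches with a recursive sequential search over the named component list: recurse past unmatched components, bump at the first name equal to release_type (last component as default), and zero-fill the tail.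
import Mathlib
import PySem

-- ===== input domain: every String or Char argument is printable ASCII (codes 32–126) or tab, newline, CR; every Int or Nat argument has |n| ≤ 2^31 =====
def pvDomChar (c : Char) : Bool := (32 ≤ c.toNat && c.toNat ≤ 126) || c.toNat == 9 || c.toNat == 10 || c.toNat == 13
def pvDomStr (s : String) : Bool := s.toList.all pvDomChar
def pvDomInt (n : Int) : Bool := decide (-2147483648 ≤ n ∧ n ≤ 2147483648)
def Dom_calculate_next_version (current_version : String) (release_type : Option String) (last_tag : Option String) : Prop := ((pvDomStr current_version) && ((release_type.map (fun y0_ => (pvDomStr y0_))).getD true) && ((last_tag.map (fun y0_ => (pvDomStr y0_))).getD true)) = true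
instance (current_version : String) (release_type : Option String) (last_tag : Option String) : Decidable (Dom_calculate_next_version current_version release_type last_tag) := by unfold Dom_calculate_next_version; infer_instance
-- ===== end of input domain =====

-- B replaces A's three format-string branches with a recursive sequential search over the named components (alternative decomposition, same cost); Pre_ excludes inputs where A raises ValueError.


-- ===== PORT A =====
def calculate_next_version (current_version : String) (release_type : Option String) (last_tag : Option String) : Option String :=
  match release_type with
  | none => none
  | some rt =>
    match last_tag with
    | none => some current_version
    | some _ =>
      -- major, minor, patch = (int(part) for part in current_version.split("."))
      match (((PySem.Str.split? current_version ".").getD [])).map PySem.Int.ofStr? with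
      | [some major, some minor, some patch] =>
        if rt = "major" then
          some (PySem.Str.join "." [PySem.Int.toStr (major + 1), "0", "0"])
        else if rt = "minor" then
          some (PySem.Str.join "." [PySem.Int.toStr major, PySem.Int.toStr (minor + 1), "0"])
        else
          some (PySem.Str.join "." [PySem.Int.toStr major, PySem.Int.toStr minor, PySem.Int.toStr (patch + 1)])
      | _ => none  -- ValueError: excluded by Pre_

-- ===== PORT B =====
-- go(vals, names): recursive sequential search; names is never shorter than vals
-- on the calls B makes, so names[0] is ported as headD (unreachable-default).
def pvGo (rt : String) : List Int → List String → List Int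
  | [], _ => []
  | v :: vs, names =>
      if names.headD "" = rt ∨ vs = [] then
        (v + 1) :: List.replicate vs.length 0
      else
        v :: pvGo rt vs (names.drop 1)

def calculate_next_version_alt (current_version : String) (release_type : Option String) (last_tag : Option String) : Option String :=
  Option.elim release_type none (fun rt =>
    Option.elim last_tag (some current_version) (fun _ =>
      let xs := (PySem.Str.split? current_version ".").getD []
      let nums := xs.map PySem.Int.ofStr?
      -- major, minor, patch = (int(part) for part in ...): ValueError (none) unless 3 parseable parts
      if xs.length = 3 ∧ nums.all Option.isSome then
        some (PySem.Str.join "."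
          ((pvGo rt (nums.filterMap id) ["major", "minor", "patch"]).map PySem.Int.toStr))
      else none))

-- ===== PRECONDITION & SPEC =====
-- Pre_ excludes exactly the inputs where A raises ValueError: a version string that does
-- not split on "." into exactly three int()-parseable parts (only reached when both
-- release_type and last_tag are present).
def Pre_calculate_next_version (current_version : String) (release_type : Option String) (last_tag : Option String) : Prop :=
  release_type = none ∨ last_tag = none ∨
    ((((PySem.Str.split? current_version ".").getD [])).length = 3 ∧
     ∀ p ∈ ((PySem.Str.split? current_version ".").getD []), (PySem.Int.ofStr? p).isSome)
instance (current_version : String) (release_type : Option String) (last_tag : Option String) : Decidable (Pre_calculate_next_version current_version release_type last_tag) := by unfold Pre_calculate_next_version; infer_instance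
def pvWitness_calculate_next_version : String × Option String × Option String := ("1.2.3", some "minor", some "v1.2.3")
def Spec_calculate_next_version (current_version : String) (release_type : Option String) (last_tag : Option String) (out : Option String) : Prop := out = calculate_next_version_alt current_version release_type last_tag
instance (current_version : String) (release_type : Option String) (last_tag : Option String) (out : Option String) : Decidable (Spec_calculate_next_version current_version release_type last_tag out) := by unfold Spec_calculate_next_version; infer_instance

-- ===== CLAIM (what is proved, stated in full; the proofs are below) =====
def Claim_equal_calculate_next_version : Prop := ∀ (current_version : String) (release_type : Option String) (last_tag : Option String), Dom_calculate_next_version current_version release_type last_tag → Pre_calculate_next_version current_version release_type last_tag → Spec_calculate_next_version current_version release_type last_tag (calculate_next_version current_version release_type last_tag)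

-- ===== LEMMAS AND PROOFS =====

-- ===== VERDICT (by name: the statement is the Claim_ definition above) =====
theorem calculate_next_version_spec : Claim_equal_calculate_next_version := by
  intro cv rt lt _ hpre
  unfold Spec_calculate_next_version calculate_next_version calculate_next_version_alt
  cases rt with
  | none => rfl
  | some rts =>
  cases lt with
  | none => rfl
  | some lts =>
  rcases hpre with h | h | ⟨hlen, hall⟩
  · simp at h
  · simp at h
  · match hmatch : ((PySem.Str.split? cv ".").getD []) with
    | [a, b, c] =>
      obtain ⟨ma, hma⟩ := Option.isSome_iff_exists.mp (hall a (by rw [hmatch]; simp))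
      obtain ⟨mb, hmb⟩ := Option.isSome_iff_exists.mp (hall b (by rw [hmatch]; simp))
      obtain ⟨mc, hmc⟩ := Option.isSome_iff_exists.mp (hall c (by rw [hmatch]; simp))
      simp only [List.map, hma, hmb, hmc]
      have h0 : PySem.Int.toStr 0 = "0" := rfl
      by_cases h1 : rts = "major"
      · subst h1
        simp [pvGo, h0]
      · by_cases h2 : rts = "minor"
        · subst h2; simp [pvGo, h0]
        · simp [h1, h2, pvGo, Ne.symm h1, Ne.symm h2]
    | [] => rw [hmatch] at hlen; simp at hlen
    | [_] => rw [hmatch] at hlen; simp at hlen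
    | [_, _] => rw [hmatch] at hlen; simp at hlen
    | _ :: _ :: _ :: _ :: _ => rw [hmatch] at hlen; simp at hlen
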